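-- pv_equiv track=rewrite | github.com/s4sikdar/Tic-Tac-Toe-OOP-version | File_and_menu.py | Check
-- ===== SOURCE A (Python) =====
-- def Check(Our_string):
--     Input_string = Our_string.casefold()
--     List_of_chars = list(Input_string)
--
--     if (Input_string == ('username'.casefold())):
--         return False
--
--     if (((len(List_of_chars)) > 15) and ((len(List_of_chars)) == 0)):
--         return False
--
--     for i in (range((len(List_of_chars)) - 1)):
--         if (List_of_chars[i] == ' '):
--             if (List_of_chars[i + 1] == ' '):
--                 return False
--
--     for i in (range(len(List_of_chars))):
--         if (not ('a' <= List_of_chars[i] <= 'z')):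
--             if (not ('0' <= List_of_chars[i] <= '9')):
--                 if (not (List_of_chars[i] == '_')):
--                     if (not (List_of_chars[i] == '-')):
--                         if (not (List_of_chars[i] == ' ')):
--                             return False
--     del List_of_chars
--     del Input_string
--     return True
-- ===== SOURCE B (Python) =====
-- # Single-pass deterministic finite automaton: one transition-table walk over the
-- # string replaces A's two separate index loops (adjacent-space scan + nested-if
-- # character whitelist). States: 'norm' (last char not a space), 'space' (last
-- # char was a space), 'dead' (rejected). A's len>15-and-len==0 guard is dead code.
--
-- def _cls(c):
--     if c == ' ':
--         return 'sp'
--     if 'a' <= c <= 'z' or '0' <= c <= '9' or c == '_' or c == '-':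
--         return 'ok'
--     return 'bad'
--
-- _DELTA = {
--     ('norm', 'ok'): 'norm',  ('norm', 'sp'): 'space', ('norm', 'bad'): 'dead',
--     ('space', 'ok'): 'norm', ('space', 'sp'): 'dead', ('space', 'bad'): 'dead',
--     ('dead', 'ok'): 'dead',  ('dead', 'sp'): 'dead',  ('dead', 'bad'): 'dead',
-- }
--
-- def Check(Our_string):
--     s = Our_string.casefold()
--     if s == 'username':
--         return False
--     state = 'norm'
--     for c in s:
--         state = _DELTA[(state, _cls(c))]
--     return state != 'dead'
-- ===== Notes on version B (the rewrite author's own statement) =====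
-- stated objective: alternative
-- what changed: Replaced A's two staged index loops (adjacent-space scan, then a nested-if character whitelist) with a single-pass three-state finite automaton driven by a transition table, merging both checks into one stateful traversal; A's unreachable len>15-and-len==0 guard is dropped.
import Mathlib
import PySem

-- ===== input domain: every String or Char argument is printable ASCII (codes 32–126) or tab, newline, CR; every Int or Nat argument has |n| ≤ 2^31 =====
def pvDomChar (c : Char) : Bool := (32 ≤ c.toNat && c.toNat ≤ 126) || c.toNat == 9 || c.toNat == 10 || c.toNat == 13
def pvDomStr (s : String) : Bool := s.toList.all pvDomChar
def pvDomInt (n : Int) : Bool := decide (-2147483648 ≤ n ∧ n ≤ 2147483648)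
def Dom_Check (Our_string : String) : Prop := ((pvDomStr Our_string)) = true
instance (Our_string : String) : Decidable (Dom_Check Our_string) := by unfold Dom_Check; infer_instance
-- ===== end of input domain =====

-- B replaces A's two staged index loops with ONE pass of a three-state finite
-- automaton (transition table), merging the adjacent-space rule and the character
-- whitelist; A's unreachable len>15-and-len==0 guard is dropped (alternative, same cost).

-- ===== PORT A =====
-- the innermost nested-if chain of A's second loop, as one Bool predicate
def badChar (c : Char) : Bool :=
  !('a' ≤ c && c ≤ 'z') && !('0' ≤ c && c ≤ '9') && !(c == '_') && !(c == '-') && !(c == ' ')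

def Check (Our_string : String) : Bool :=
  let Input_string := PySem.Str.lower Our_string   -- .casefold() = .lower() on the ASCII domain
  let List_of_chars := Input_string.toList
  if Input_string == PySem.Str.lower "username" then false
  else if decide (List_of_chars.length > 15) && decide (List_of_chars.length = 0) then false
  else if (PySem.List.pyRange 0 ((List_of_chars.length : Int) - 1) 1).any (fun i =>
      (PySem.List.pyGetD List_of_chars i ' ' == ' ') && (PySem.List.pyGetD List_of_chars (i+1) ' ' == ' ')) then false
  else if (PySem.List.pyRange 0 ((List_of_chars.length : Int)) 1).any (fun i =>
      badChar (PySem.List.pyGetD List_of_chars i ' ')) then false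
  else true

-- ===== PORT B =====
-- automaton states: norm = last char not a space, space = last char was a space, dead = rejected
inductive PvSt : Type
  | norm
  | space
  | dead
deriving DecidableEq, Repr

-- character classes produced by Source B's _cls
inductive PvCls : Type
  | sp
  | ok
  | bad
deriving DecidableEq, Repr

def pvCls (c : Char) : PvCls :=
  if c == ' ' then PvCls.sp
  else if ('a' ≤ c && c ≤ 'z') || ('0' ≤ c && c ≤ '9') || c == '_' || c == '-' then PvCls.ok
  else PvCls.bad

-- Source B's _DELTA transition table (a dict with a total key set = a total function)
def pvDelta : PvSt → PvCls → PvSt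
  | PvSt.norm,  PvCls.ok  => PvSt.norm
  | PvSt.norm,  PvCls.sp  => PvSt.space
  | PvSt.norm,  PvCls.bad => PvSt.dead
  | PvSt.space, PvCls.ok  => PvSt.norm
  | PvSt.space, PvCls.sp  => PvSt.dead
  | PvSt.space, PvCls.bad => PvSt.dead
  | PvSt.dead,  _         => PvSt.dead

def Check_alt (Our_string : String) : Bool :=
  let s := PySem.Str.lower Our_string              -- .casefold() = .lower() on the ASCII domain
  if s == "username" then false
  else !((s.toList.foldl (fun st c => pvDelta st (pvCls c)) PvSt.norm) == PvSt.dead)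

-- ===== PRECONDITION & SPEC =====
def Spec_Check (Our_string : String) (out : Bool) : Prop := out = Check_alt Our_string
instance (Our_string : String) (out : Bool) : Decidable (Spec_Check Our_string out) := by unfold Spec_Check; infer_instance

-- ===== CLAIM (what is proved, stated in full; the proofs are below) =====
def Claim_equal_Check : Prop := ∀ (Our_string : String), Dom_Check Our_string → Spec_Check Our_string (Check Our_string)

-- ===== LEMMAS AND PROOFS =====

-- does the list contain two adjacent spaces?
def hasPair : List Char → Bool
  | [] => false
  | [_] => false
  | a :: b :: rest => (a == ' ' && b == ' ') || hasPair (b :: rest)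

def headSpace : List Char → Bool
  | [] => false
  | a :: _ => a == ' '

theorem hasPair_cons (c : Char) (L : List Char) :
    hasPair (c :: L) = ((c == ' ' && headSpace L) || hasPair L) := by
  cases L with
  | nil => simp [hasPair, headSpace]
  | cons b rest => simp [hasPair, headSpace]

-- trichotomy of a character under Source B's _cls, expressed against A's badChar
theorem cls_space (c : Char) (h : c = ' ') : pvCls c = PvCls.sp ∧ badChar c = false := by
  subst h; decide

theorem cls_bad (c : Char) (h : badChar c = true) : pvCls c = PvCls.bad := by
  unfold badChar at h
  unfold pvCls
  simp only [Bool.and_eq_true, Bool.not_eq_true'] at h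
  obtain ⟨⟨⟨⟨h1, h2⟩, h3⟩, h4⟩, h5⟩ := h
  rw [if_neg (by simp [h5]), if_neg (by simp [h1, h2, h3, h4])]

theorem cls_ok (c : Char) (hs : ¬ c = ' ') (hb : badChar c = false) : pvCls c = PvCls.ok := by
  unfold badChar at hb
  unfold pvCls
  rw [if_neg (by simpa using hs)]
  rw [if_pos]
  simp only [Bool.and_eq_false_iff, Bool.not_eq_eq_eq_not] at hb
  rcases hb with ((((h | h) | h) | h) | h) <;> simp [h] <;> simp_all

-- joint characterisation of the automaton run from each live start state
theorem run_spec (L : List Char) :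
    ((L.foldl (fun st c => pvDelta st (pvCls c)) PvSt.dead == PvSt.dead) = true)
    ∧ ((L.foldl (fun st c => pvDelta st (pvCls c)) PvSt.norm == PvSt.dead)
        = (L.any badChar || hasPair L))
    ∧ ((L.foldl (fun st c => pvDelta st (pvCls c)) PvSt.space == PvSt.dead)
        = (L.any badChar || hasPair L || headSpace L)) := by
  induction L with
  | nil => refine ⟨rfl, rfl, rfl⟩
  | cons c L ih =>
    obtain ⟨ihD, ihN, ihS⟩ := ih
    refine ⟨?_, ?_, ?_⟩
    · rw [List.foldl_cons, show pvDelta PvSt.dead (pvCls c) = PvSt.dead from rfl]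
      exact ihD
    · rw [List.foldl_cons, List.any_cons, hasPair_cons]
      by_cases hb : badChar c = true
      · rw [cls_bad c hb, show pvDelta PvSt.norm PvCls.bad = PvSt.dead from rfl, ihD, hb]
        rfl
      · have hb' : badChar c = false := by simpa using hb
        by_cases hs : c = ' '
        · obtain ⟨hcl, _⟩ := cls_space c hs
          rw [hcl, show pvDelta PvSt.norm PvCls.sp = PvSt.space from rfl, ihS, hb',
            show (c == ' ') = true from by simp [hs]]
          cases L.any badChar <;> cases hasPair L <;> cases headSpace L <;> rfl
        · rw [cls_ok c hs hb', show pvDelta PvSt.norm PvCls.ok = PvSt.norm from rfl, ihN, hb',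
            show (c == ' ') = false from by simpa using hs]
          cases L.any badChar <;> cases hasPair L <;> rfl
    · rw [List.foldl_cons, List.any_cons, hasPair_cons]
      by_cases hb : badChar c = true
      · rw [cls_bad c hb, show pvDelta PvSt.space PvCls.bad = PvSt.dead from rfl, ihD, hb]
        rfl
      · have hb' : badChar c = false := by simpa using hb
        by_cases hs : c = ' '
        · obtain ⟨hcl, _⟩ := cls_space c hs
          rw [hcl, show pvDelta PvSt.space PvCls.sp = PvSt.dead from rfl, ihD, hb',
            show (c == ' ') = true from by simp [hs],
            show headSpace (c :: L) = true from by simp [headSpace, hs]]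
          cases L.any badChar <;> cases hasPair L <;> cases headSpace L <;> rfl
        · rw [cls_ok c hs hb', show pvDelta PvSt.space PvCls.ok = PvSt.norm from rfl, ihN, hb',
            show (c == ' ') = false from by simpa using hs,
            show headSpace (c :: L) = false from by simpa [headSpace] using hs]
          cases L.any badChar <;> cases hasPair L <;> rfl

-- the adjacent-space existential behind A's first loop
theorem hasPair_iff (L : List Char) :
    hasPair L = true ↔ ∃ j : Nat, j + 1 < L.length ∧ L.getD j ' ' = ' ' ∧ L.getD (j+1) ' ' = ' ' := by
  induction L with
  | nil => simp [hasPair]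
  | cons c L ih =>
    rw [hasPair_cons]
    constructor
    · intro h
      simp only [Bool.or_eq_true, Bool.and_eq_true, beq_iff_eq] at h
      rcases h with ⟨hc, hh⟩ | hrec
      · cases L with
        | nil => simp [headSpace] at hh
        | cons d L' =>
          simp only [headSpace, beq_iff_eq] at hh
          exact ⟨0, by simp, by simpa using hc, by simpa using hh⟩
      · obtain ⟨j, hj, h1, h2⟩ := ih.mp hrec
        exact ⟨j+1, by simpa using Nat.succ_lt_succ hj, by simpa using h1, by simpa using h2⟩
    · rintro ⟨j, hj, h1, h2⟩
      simp only [Bool.or_eq_true, Bool.and_eq_true, beq_iff_eq]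
      cases j with
      | zero =>
        left
        cases L with
        | nil => simp at hj
        | cons d L' =>
          simp only [List.getD_cons_zero] at h1
          simp only [List.getD_cons_succ, List.getD_cons_zero] at h2
          exact ⟨h1, by simp [headSpace, h2]⟩
      | succ j' =>
        right
        exact ih.mpr ⟨j', by simpa using hj, by simpa using h1, by simpa using h2⟩

-- A's first loop (pyRange over index pairs) computes hasPair
theorem pairs_any (L : List Char) :
    ((PySem.List.pyRange 0 ((L.length : Int) - 1) 1).any (fun i =>
      (PySem.List.pyGetD L i ' ' == ' ') && (PySem.List.pyGetD L (i+1) ' ' == ' '))) =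
    hasPair L := by
  rcases Bool.eq_false_or_eq_true (hasPair L) with h | h <;> rw [h]
  · rw [hasPair_iff] at h
    obtain ⟨j, hj, h1, h2⟩ := h
    rw [List.any_eq_true]
    refine ⟨(j : Int), PySem.List.mem_pyRange_one.mpr ⟨by omega, by omega⟩, ?_⟩
    have hc : (j : Int) + 1 = ((j + 1 : Nat) : Int) := by omega
    rw [hc, PySem.List.pyGetD_natCast, PySem.List.pyGetD_natCast]
    simp only [Bool.and_eq_true, beq_iff_eq]
    exact ⟨h1, h2⟩
  · have h' := h
    rw [show hasPair L = false ↔ ¬ hasPair L = true from by simp, hasPair_iff] at h'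
    rw [List.any_eq_false]
    intro i hi
    obtain ⟨h0, h1⟩ := PySem.List.mem_pyRange_one.mp hi
    by_contra hc
    simp only [Bool.and_eq_true, beq_iff_eq] at hc
    obtain ⟨hc1, hc2⟩ := hc
    refine h' ⟨i.toNat, by omega, ?_, ?_⟩
    · have hi' : i = (i.toNat : Int) := by omega
      rw [hi', PySem.List.pyGetD_natCast] at hc1; exact hc1
    · have hi' : i + 1 = ((i.toNat + 1 : Nat) : Int) := by omega
      rw [hi', PySem.List.pyGetD_natCast] at hc2; exact hc2

-- A's second loop (pyRange over all indices) computes L.any badChar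
theorem anyloop (L : List Char) :
    ((PySem.List.pyRange 0 ((L.length : Int)) 1).any (fun i =>
      badChar (PySem.List.pyGetD L i ' '))) = L.any badChar := by
  conv_rhs => rw [← PySem.List.map_pyGetD_pyRange_zero' L ' ']
  rw [List.any_map]; rfl

-- ===== VERDICT (by name: the statement is the Claim_ definition above) =====
theorem Check_spec : Claim_equal_Check := by
  intro s _hdom
  unfold Spec_Check Check Check_alt
  dsimp only
  rw [show PySem.Str.lower "username" = "username" from by decide]
  obtain ⟨_, hN, _⟩ := run_spec ((PySem.Str.lower s).toList)
  rw [pairs_any ((PySem.Str.lower s).toList), anyloop ((PySem.Str.lower s).toList), hN]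
  cases hu : (PySem.Str.lower s == "username") with
  | true => simp only [if_true]
  | false =>
    have hg : (decide ((PySem.Str.lower s).toList.length > 15)
        && decide ((PySem.Str.lower s).toList.length = 0)) = false := by
      simp only [Bool.and_eq_false_iff, decide_eq_false_iff_not]
      omega
    simp only [hg, Bool.false_eq_true, if_false]
    cases hp : hasPair ((PySem.Str.lower s).toList) <;>
      cases hb : ((PySem.Str.lower s).toList).any badChar <;>
        simp
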